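-- pv_equiv track=rewrite | github.com/schniti269/MindWork | Methods/tagging.py | set_clean
-- ===== SOURCE A (Python) =====
-- def set_clean(my_set):
--     cleaned_set = my_set.copy()
--
--     for str1 in my_set:
--         for str2 in my_set:
--             if str1 < str2 and str2.startswith(str1):
--                 cleaned_set.discard(str1)
--                 continue
--             if str1 > str2 and str1.startswith(str2):
--                 cleaned_set.discard(str2)
--                 continue
--     return cleaned_set
-- ===== SOURCE B (Python) =====
-- def set_clean(my_set):
--     srt = sorted(my_set)
--     bad = {a for a, b in zip(srt, srt[1:]) if b.startswith(a)}
--     return {s for s in my_set if s not in bad}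
-- ===== Notes on version B (the rewrite author's own statement) =====
-- stated objective: faster
-- what changed: Instead of the quadratic all-pairs scan that discards every string having a proper extension in the set, B sorts the set once and collects exactly the strings that are a prefix of their immediate lexicographic successor, then filters the set by that bad-set.
import Mathlib
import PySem

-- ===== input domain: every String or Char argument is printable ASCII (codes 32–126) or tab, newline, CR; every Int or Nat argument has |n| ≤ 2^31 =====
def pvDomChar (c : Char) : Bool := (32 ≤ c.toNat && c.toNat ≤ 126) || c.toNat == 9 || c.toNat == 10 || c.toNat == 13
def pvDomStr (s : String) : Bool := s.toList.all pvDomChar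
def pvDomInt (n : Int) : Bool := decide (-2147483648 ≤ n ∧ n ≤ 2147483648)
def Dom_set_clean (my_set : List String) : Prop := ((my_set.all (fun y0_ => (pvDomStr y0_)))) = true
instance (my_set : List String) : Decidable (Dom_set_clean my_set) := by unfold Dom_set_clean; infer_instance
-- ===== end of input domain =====

-- B replaces A's all-pairs O(n^2*L) scan by sort + adjacent-prefix detection (asymptotically faster).

-- ===== PORT A =====
def set_clean (my_set : List String) : List String :=
  let cleaned_set := my_set
  my_set.foldl (fun cleaned str1 =>
    my_set.foldl (fun cleaned str2 =>
      if decide (str1 < str2) && PySem.Str.startswith str2 str1 then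
        PySem.Set.discard cleaned str1
      else if decide (str2 < str1) && PySem.Str.startswith str1 str2 then
        PySem.Set.discard cleaned str2
      else cleaned) cleaned) cleaned_set

-- ===== PORT B =====
def set_clean_alt (my_set : List String) : List String :=
  let srt := PySem.List.sorted my_set (fun x => x) false
  let bad : PySem.Set String :=
    PySem.Set.ofList (((srt.zip (PySem.List.slice srt (some 1) none)).filter
      (fun p => PySem.Str.startswith p.2 p.1)).map Prod.fst)
  PySem.Set.ofList (my_set.filter (fun s => !(PySem.Set.contains bad s)))

-- ===== PRECONDITION & SPEC =====
-- The argument encodes a Python set (type set[str]): its elements are distinct; a list with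
-- duplicates does not represent any input the Python function can receive.
def Pre_set_clean (my_set : List String) : Prop := my_set.Nodup
instance (my_set : List String) : Decidable (Pre_set_clean my_set) := by unfold Pre_set_clean; infer_instance
def pvWitness_set_clean : List String := (["ab", "a", "b"])
def Spec_set_clean (my_set : List String) (out : List String) : Prop := out = set_clean_alt my_set
instance (my_set : List String) (out : List String) : Decidable (Spec_set_clean my_set out) := by unfold Spec_set_clean; infer_instance

-- ===== CLAIM (what is proved, stated in full; the proofs are below) =====
def Claim_equal_set_clean : Prop := ∀ (my_set : List String), Dom_set_clean my_set → Pre_set_clean my_set → Spec_set_clean my_set (set_clean my_set)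

-- ===== LEMMAS AND PROOFS =====

-- the per-pair keep predicate of A's inner-loop body
def pvKeep (a b x : String) : Bool :=
  if decide (a < b) && PySem.Str.startswith b a then !(x == a)
  else if decide (b < a) && PySem.Str.startswith a b then !(x == b)
  else true

theorem pvDiscard_eq_filter (s : List String) (x : String) :
    PySem.Set.discard s x = s.filter (fun y => !(y == x)) := by
  unfold PySem.Set.discard; rfl

theorem pvFoldl_filter_all {α β : Type} (g : β → α → Bool) (l : List β) (c : List α) :
    l.foldl (fun c b => c.filter (g b)) c = c.filter (fun x => l.all (fun b => g b x)) := by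
  induction l generalizing c with
  | nil => simp
  | cons b t ih => simp [List.foldl_cons, ih, List.filter_filter, Bool.and_comm]

theorem pvStep_eq (a b : String) (c : List String) :
    (if decide (a < b) && PySem.Str.startswith b a then PySem.Set.discard c a
     else if decide (b < a) && PySem.Str.startswith a b then PySem.Set.discard c b
     else c) = c.filter (pvKeep a b) := by
  unfold pvKeep
  split_ifs with h1 h2 <;> simp [pvDiscard_eq_filter]

theorem pvA_char (l : List String) :
    set_clean l = l.filter (fun x => l.all (fun a => l.all (fun b => pvKeep a b x))) := by
  unfold set_clean
  have hfun : (fun (cleaned : List String) (str1 : String) =>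
      l.foldl (fun cleaned str2 =>
        if decide (str1 < str2) && PySem.Str.startswith str2 str1 then
          PySem.Set.discard cleaned str1
        else if decide (str2 < str1) && PySem.Str.startswith str1 str2 then
          PySem.Set.discard cleaned str2
        else cleaned) cleaned)
      = (fun (cleaned : List String) (str1 : String) =>
          cleaned.filter (fun x => l.all (fun b => pvKeep str1 b x))) := by
    funext c a
    have : (fun (cleaned : List String) (str2 : String) =>
        if decide (a < str2) && PySem.Str.startswith str2 a then
          PySem.Set.discard cleaned a
        else if decide (str2 < a) && PySem.Str.startswith a str2 then
          PySem.Set.discard cleaned str2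
        else cleaned)
        = (fun (cleaned : List String) (str2 : String) => cleaned.filter (pvKeep a str2)) := by
      funext c' b; exact pvStep_eq a b c'
    rw [this, pvFoldl_filter_all]
  rw [hfun, pvFoldl_filter_all (fun a x => l.all (fun b => pvKeep a b x))]

theorem pvMem_zip_tail_iff {α : Type} (l : List α) (p : α × α) :
    p ∈ l.zip l.tail ↔ ∃ i, ∃ h : i + 1 < l.length, p = (l[i], l[i+1]) := by
  rw [List.mem_iff_getElem]
  constructor
  · rintro ⟨i, hi, rfl⟩
    simp only [List.length_zip, List.length_tail] at hi
    refine ⟨i, by omega, ?_⟩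
    simp [List.getElem_zip, List.getElem_tail]
  · rintro ⟨i, hi, rfl⟩
    refine ⟨i, by simp [List.length_zip, List.length_tail]; omega, ?_⟩
    simp [List.getElem_zip, List.getElem_tail]

theorem pvLex_sandwich : ∀ (s u t : List Char),
    List.Lex (· < ·) s u → List.Lex (· < ·) u t → s <+: t → s <+: u := by
  intro s
  induction s with
  | nil => intro u t _ _ _; exact List.nil_prefix
  | cons c s' ih =>
    intro u t h1 h2 hp
    cases h1 with
    | rel hcd =>
      rename_i d u'
      cases h2 with
      | rel hde =>
        rename_i e t'
        obtain ⟨t'', ht⟩ := hp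
        cases ht
        exact absurd (lt_trans hcd hde) (lt_irrefl c)
      | cons h2' =>
        obtain ⟨t'', ht⟩ := hp
        cases ht
        exact absurd hcd (lt_irrefl c)
    | cons h1' =>
      rename_i u'
      cases h2 with
      | rel hde =>
        rename_i e t'
        obtain ⟨t'', ht⟩ := hp
        cases ht
        exact absurd hde (lt_irrefl c)
      | cons h2' =>
        obtain ⟨t'', ht⟩ := hp
        cases ht
        obtain ⟨r, hr⟩ := ih u' _ h1' h2' ⟨t'', rfl⟩
        exact ⟨r, by rw [List.cons_append, hr]⟩

theorem pvPrefix_sandwich (s u t : String) (h1 : s ≤ u) (h2 : u ≤ t)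
    (hp : s.toList <+: t.toList) : s.toList <+: u.toList := by
  rcases eq_or_lt_of_le h1 with rfl | h1'
  · exact List.prefix_refl _
  rcases eq_or_lt_of_le h2 with rfl | h2'
  · exact hp
  have b1 : List.Lex (· < ·) s.toList u.toList :=
    (List.lt_iff_lex_lt _ _).1 (String.lt_iff_toList_lt.1 h1')
  have b2 : List.Lex (· < ·) u.toList t.toList :=
    (List.lt_iff_lex_lt _ _).1 (String.lt_iff_toList_lt.1 h2')
  exact pvLex_sandwich _ _ _ b1 b2 hp

-- the mathematical removal condition
def pvRemoved (l : List String) (x : String) : Prop :=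
  ∃ t ∈ l, x < t ∧ PySem.Str.startswith t x = true

theorem pvKeep_iff (l : List String) (x : String) (hx : x ∈ l) :
    (l.all (fun a => l.all (fun b => pvKeep a b x)) = true) ↔ ¬ pvRemoved l x := by
  simp only [List.all_eq_true]
  constructor
  · rintro h ⟨t, ht, hlt, hsw⟩
    have := h x hx t ht
    unfold pvKeep at this
    rw [if_pos (by simp only [hlt, decide_true, hsw, Bool.and_self])] at this
    simp at this
  · intro h a ha b hb
    unfold pvKeep
    split_ifs with h1 h2
    · simp only [Bool.and_eq_true, decide_eq_true_eq] at h1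
      simp only [Bool.not_eq_eq_eq_not, Bool.not_true, beq_eq_false_iff_ne]
      rintro rfl
      exact h ⟨b, hb, h1.1, h1.2⟩
    · simp only [Bool.and_eq_true, decide_eq_true_eq] at h2
      simp only [Bool.not_eq_eq_eq_not, Bool.not_true, beq_eq_false_iff_ne]
      rintro rfl
      exact h ⟨a, ha, h2.1, h2.2⟩
    · rfl

theorem pvBad_iff (l : List String) (hnd : l.Nodup) (x : String) (hx : x ∈ l) :
    (PySem.Set.contains
      (PySem.Set.ofList ((((PySem.List.sorted l (fun x => x) false).zip
        (PySem.List.slice (PySem.List.sorted l (fun x => x) false) (some 1) none)).filter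
        (fun p => PySem.Str.startswith p.2 p.1)).map Prod.fst)) x = true)
      ↔ pvRemoved l x := by
  have hperm : (PySem.List.sorted l (fun x => x) false).Perm l := PySem.List.sorted_perm l _ _
  set srt := PySem.List.sorted l (fun x => x) false with hsrt
  have hnds : srt.Nodup := hperm.symm.nodup hnd
  have hmem : ∀ y, y ∈ srt ↔ y ∈ l := fun y => hperm.mem_iff
  have hmono : ∀ (p q : Nat) (hpq : p ≤ q), ∀ h : q < srt.length, srt[p]'(by omega) ≤ srt[q] := by
    intro p q hpq h
    exact PySem.List.sorted_id_getElem_mono l hpq h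
  rw [PySem.Set.contains_iff, PySem.Set.mem_ofList, PySem.List.slice_from_one]
  constructor
  · intro hmem'
    obtain ⟨p, hp, rfl⟩ := List.mem_map.1 hmem'
    obtain ⟨hpz, hpsw⟩ := List.mem_filter.1 hp
    obtain ⟨i, hi, rfl⟩ := (pvMem_zip_tail_iff srt p).1 hpz
    refine ⟨srt[i+1], (hmem _).1 (List.getElem_mem _), ?_, hpsw⟩
    have hle : srt[i] ≤ srt[i+1] := hmono i (i+1) (by omega) hi
    have hne : srt[i] ≠ srt[i+1] := by
      intro hcontra
      have := (List.Nodup.getElem_inj_iff hnds).1 hcontra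
      omega
    exact lt_of_le_of_ne hle hne
  · rintro ⟨t, htl, hlt, hsw⟩
    have hx' : x ∈ srt := (hmem x).2 hx
    have ht' : t ∈ srt := (hmem t).2 htl
    obtain ⟨i, hi, hxi⟩ := List.mem_iff_getElem.1 hx'
    obtain ⟨j, hj, htj⟩ := List.mem_iff_getElem.1 ht'
    have hij : i < j := by
      by_contra hc
      have : srt[j] ≤ srt[i] := hmono j i (by omega) hi
      rw [hxi, htj] at this
      exact absurd hlt (not_lt.2 this)
    have hi1 : i + 1 < srt.length := by omega
    have hpre : x.toList <+: t.toList := by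
      have := hsw
      simpa [PySem.Chars.startswith_iff] using this
    have hpre' : x.toList <+: (srt[i+1]'hi1).toList := by
      refine pvPrefix_sandwich x (srt[i+1]'hi1) t ?_ ?_ hpre
      · rw [← hxi]; exact hmono i (i+1) (by omega) hi1
      · rw [← htj]; exact hmono (i+1) j (by omega) hj
    refine List.mem_map.2 ⟨(srt[i]'(by omega), srt[i+1]'hi1), ?_, by rw [hxi]⟩
    refine List.mem_filter.2 ⟨(pvMem_zip_tail_iff srt _).2 ⟨i, hi1, rfl⟩, ?_⟩
    have : PySem.Str.startswith (srt[i+1]'hi1) (srt[i]'(by omega)) = true := by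
      rw [hxi]
      simpa [PySem.Chars.startswith_iff] using hpre'
    simpa using this

-- ===== VERDICT (by name: the statement is the Claim_ definition above) =====
theorem set_clean_spec : Claim_equal_set_clean := by
  intro l _ hnd
  unfold Spec_set_clean set_clean_alt
  rw [pvA_char]
  show _ = PySem.Set.ofList (l.filter (fun s => !(PySem.Set.contains
      (PySem.Set.ofList ((((PySem.List.sorted l (fun x => x) false).zip
        (PySem.List.slice (PySem.List.sorted l (fun x => x) false) (some 1) none)).filter
        (fun p => PySem.Str.startswith p.2 p.1)).map Prod.fst)) s)))
  rw [PySem.Set.ofList_eq_self_of_nodup _ (List.Nodup.filter _ hnd)]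
  apply List.filter_congr
  intro x hx
  have h1 := pvKeep_iff l x hx
  have h2 := pvBad_iff l hnd x hx
  by_cases hr : pvRemoved l x
  · have ha : (l.all (fun a => l.all (fun b => pvKeep a b x))) = false := by
      cases h : (l.all (fun a => l.all (fun b => pvKeep a b x)))
      · rfl
      · exact absurd hr (h1.1 h)
    rw [ha, h2.2 hr]; rfl
  · have hc : (PySem.Set.contains
      (PySem.Set.ofList ((((PySem.List.sorted l (fun x => x) false).zip
        (PySem.List.slice (PySem.List.sorted l (fun x => x) false) (some 1) none)).filter
        (fun p => PySem.Str.startswith p.2 p.1)).map Prod.fst)) x) = false := by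
      cases h : (PySem.Set.contains
      (PySem.Set.ofList ((((PySem.List.sorted l (fun x => x) false).zip
        (PySem.List.slice (PySem.List.sorted l (fun x => x) false) (some 1) none)).filter
        (fun p => PySem.Str.startswith p.2 p.1)).map Prod.fst)) x)
      · rfl
      · exact absurd (h2.1 h) hr
    rw [h1.2 hr, hc]; rfl
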